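-- pv_equiv track=rewrite | github.com/its-not-rocket-science/kalmanorix | experiments/train_specialists_st.py | _tokenize_simple
-- ===== SOURCE A (Python) =====
-- from typing import List, Tuple
--
-- def _tokenize_simple(text: str) -> List[str]:
--     """Minimal tokenizer: alphanumeric chunks only."""
--     toks: List[str] = []
--     buff: List[str] = []
--     for ch in text.lower():
--         if ch.isalnum():
--             buff.append(ch)
--         else:
--             if buff:
--                 toks.append("".join(buff))
--                 buff.clear()
--     if buff:
--         toks.append("".join(buff))
--     return toks
-- ===== SOURCE B (Python) =====
-- def _tokenize_simple(text):
--     """Minimal tokenizer: alphanumeric chunks only (run scanner, no buffer)."""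
--     s = text.lower()
--     toks = []
--     n = len(s)
--     i = 0
--     while i < n:
--         if s[i].isalnum():
--             j = i + 1
--             while j < n and s[j].isalnum():
--                 j += 1
--             toks.append(s[i:j])
--             i = j
--         else:
--             i += 1
--     return toks
-- ===== Notes on version B (the rewrite author's own statement) =====
-- stated objective: alternative
-- what changed: Replaces A's per-character buffer/flush state machine with a two-pointer run scanner that finds each maximal alphanumeric run and slices it out directly; no buffer list or end-of-loop flush.
import Mathlib
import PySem

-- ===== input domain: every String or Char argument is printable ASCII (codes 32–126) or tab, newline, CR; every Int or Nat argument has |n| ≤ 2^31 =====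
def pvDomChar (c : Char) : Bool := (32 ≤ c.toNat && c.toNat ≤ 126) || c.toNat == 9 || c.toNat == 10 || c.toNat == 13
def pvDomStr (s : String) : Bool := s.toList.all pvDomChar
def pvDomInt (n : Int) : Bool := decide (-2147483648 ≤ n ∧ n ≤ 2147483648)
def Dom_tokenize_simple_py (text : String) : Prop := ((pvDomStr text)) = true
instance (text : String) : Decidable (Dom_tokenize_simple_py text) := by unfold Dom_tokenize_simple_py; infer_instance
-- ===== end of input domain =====

-- B replaces A's per-character buffer/flush state machine with a two-pointer run scanner
-- that slices out each maximal alphanumeric run; same return value, same O(n) cost.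

-- ===== PORT A =====
-- the for loop of A as structural recursion over state (toks, buff)
def pvGoA (toks : List String) (buff : List Char) : List Char → List String
  | [] => if buff.isEmpty then toks else toks ++ [String.mk buff]
  | c :: cs =>
      if PySem.Chars.isalnum c then pvGoA toks (buff ++ [c]) cs
      else if buff.isEmpty then pvGoA toks buff cs
      else pvGoA (toks ++ [String.mk buff]) [] cs

def tokenize_simple_py (text : String) : List String :=
  pvGoA [] [] (PySem.Str.lower text).toList

-- ===== PORT B =====
-- inner while loop of B: split off the maximal leading alphanumeric run
def pvRunSplit : List Char → List Char × List Char
  | [] => ([], [])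
  | c :: cs =>
      if PySem.Chars.isalnum c then
        let p := pvRunSplit cs
        (c :: p.1, p.2)
      else ([], c :: cs)

theorem pvRunSplit_len : ∀ cs : List Char, (pvRunSplit cs).2.length ≤ cs.length := by
  intro cs
  induction cs with
  | nil => simp [pvRunSplit]
  | cons c cs ih =>
      simp only [pvRunSplit]
      split
      · exact Nat.le_succ_of_le ih
      · simp

-- outer while loop of B
def pvScan : List Char → List String
  | [] => []
  | c :: cs =>
      if PySem.Chars.isalnum c then
        String.mk (c :: (pvRunSplit cs).1) :: pvScan (pvRunSplit cs).2
      else pvScan cs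
termination_by cs => cs.length
decreasing_by
  · exact Nat.lt_succ_of_le (pvRunSplit_len cs)
  · simp

def tokenize_simple_py_alt (text : String) : List String :=
  pvScan (PySem.Str.lower text).toList

-- ===== PRECONDITION & SPEC =====
def Spec_tokenize_simple_py (text : String) (out : List String) : Prop := out = tokenize_simple_py_alt text
instance (text : String) (out : List String) : Decidable (Spec_tokenize_simple_py text out) := by unfold Spec_tokenize_simple_py; infer_instance

-- ===== CLAIM (what is proved, stated in full; the proofs are below) =====
def Claim_equal_tokenize_simple_py : Prop := ∀ (text : String), Dom_tokenize_simple_py text → Spec_tokenize_simple_py text (tokenize_simple_py text)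

-- ===== LEMMAS AND PROOFS =====

-- with a nonempty buffer, A consumes the maximal alnum run, flushes, and continues with an empty buffer
theorem pvGoA_flush : ∀ (cs buff : List Char) (toks : List String), buff ≠ [] →
    pvGoA toks buff cs
      = pvGoA (toks ++ [String.mk (buff ++ (pvRunSplit cs).1)]) [] (pvRunSplit cs).2 := by
  intro cs
  induction cs with
  | nil =>
      intro buff toks hb
      simp [pvGoA, pvRunSplit, List.isEmpty_iff, hb]
  | cons c cs ih =>
      intro buff toks hb
      by_cases h : PySem.Chars.isalnum c = true
      · have := ih (buff ++ [c]) toks (by simp)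
        simp only [pvGoA, pvRunSplit, h, if_true] at *
        rw [this]
        simp
      · simp [pvGoA, pvRunSplit, h, List.isEmpty_iff, hb]

-- A with empty buffer computes B's run scan
theorem pvGoA_eq_scan : ∀ (n : ℕ) (cs : List Char), cs.length ≤ n → ∀ toks : List String,
    pvGoA toks [] cs = toks ++ pvScan cs := by
  intro n
  induction n with
  | zero =>
      intro cs hcs toks
      have : cs = [] := List.eq_nil_of_length_eq_zero (Nat.le_zero.mp hcs)
      subst this
      simp [pvGoA, pvScan]
  | succ n ih =>
      intro cs hcs toks
      match cs with
      | [] => simp [pvGoA, pvScan]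
      | c :: cs =>
          by_cases h : PySem.Chars.isalnum c = true
          · have hflush := pvGoA_flush cs [c] toks (by simp)
            simp only [pvGoA, pvScan, h, if_true, List.nil_append] at *
            rw [hflush]
            rw [ih (pvRunSplit cs).2
                (le_trans (pvRunSplit_len cs) (Nat.le_of_succ_le_succ hcs))]
            simp
          · simp only [pvGoA, pvScan, h, if_false, List.isEmpty_nil, if_true,
              Bool.false_eq_true]
            exact ih cs (Nat.le_of_succ_le_succ hcs) toks

-- ===== VERDICT (by name: the statement is the Claim_ definition above) =====
theorem tokenize_simple_py_spec : Claim_equal_tokenize_simple_py := by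
  intro text _
  unfold Spec_tokenize_simple_py tokenize_simple_py tokenize_simple_py_alt
  simpa using pvGoA_eq_scan (PySem.Str.lower text).toList.length _ le_rfl []
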